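-- pv_equiv track=rewrite | github.com/ckoons/BubbleSpacetimeTheory | play/toy_264_tseitin_expanders.py | treewidth_heuristic
-- ===== SOURCE A (Python) =====
-- from collections import defaultdict
--
-- def treewidth_heuristic(n, clauses):
--     """Greedy min-degree elimination treewidth upper bound."""
--     adj = defaultdict(set)
--     for clause in clauses:
--         vs = [lit[0] for lit in clause]
--         for i in range(len(vs)):
--             for j in range(i+1, len(vs)):
--                 adj[vs[i]].add(vs[j])
--                 adj[vs[j]].add(vs[i])
--
--     remaining = set(range(n))
--     tw = 0
--     for _ in range(n):
--         if not remaining: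
--             break
--         # Pick vertex with minimum degree
--         v = min(remaining, key=lambda x: len(adj[x] & remaining))
--         neighbors = adj[v] & remaining
--         tw = max(tw, len(neighbors))
--         # Add fill edges
--         nb_list = list(neighbors)
--         for i in range(len(nb_list)):
--             for j in range(i+1, len(nb_list)):
--                 adj[nb_list[i]].add(nb_list[j])
--                 adj[nb_list[j]].add(nb_list[i])
--         remaining.remove(v)
--     return tw
-- ===== SOURCE B (Python) =====
-- from collections import defaultdict
--
-- def treewidth_heuristic(n, clauses):
--     """Greedy min-degree elimination, with degrees maintained incrementally
--     instead of recomputing |adj[x] & remaining| for every x at every round."""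
--     adj = defaultdict(set)
--     for clause in clauses:
--         vs = [lit[0] for lit in clause]
--         for i, a in enumerate(vs):
--             for b in vs[i+1:]:
--                 adj[a].add(b)
--                 adj[b].add(a)
--
--     remaining = set(range(n))
--     deg = {x: len(adj[x] & remaining) for x in range(n)}
--     tw = 0
--     while remaining:
--         v = min(remaining, key=lambda x: deg[x])
--         neighbors = adj[v] & remaining
--         tw = max(tw, len(neighbors))
--         nb = list(neighbors)
--         for i, a in enumerate(nb):
--             for b in nb[i+1:]:
--                 if b not in adj[a]:
--                     adj[a].add(b)
--                     deg[a] += 1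
--                 if a not in adj[b]:
--                     adj[b].add(a)
--                     deg[b] += 1
--         remaining.remove(v)
--         for u in neighbors:
--             if u != v:
--                 deg[u] -= 1
--     return tw
-- ===== Notes on version B (the rewrite author's own statement) =====
-- stated objective: alternative
-- what changed: B maintains a degree table incrementally (updating only the vertices touched by fill edges and by each elimination) instead of recomputing |adj[x] & remaining| for every remaining vertex at every round, and drives the elimination by a while-loop over the shrinking set.
import Mathlib
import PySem

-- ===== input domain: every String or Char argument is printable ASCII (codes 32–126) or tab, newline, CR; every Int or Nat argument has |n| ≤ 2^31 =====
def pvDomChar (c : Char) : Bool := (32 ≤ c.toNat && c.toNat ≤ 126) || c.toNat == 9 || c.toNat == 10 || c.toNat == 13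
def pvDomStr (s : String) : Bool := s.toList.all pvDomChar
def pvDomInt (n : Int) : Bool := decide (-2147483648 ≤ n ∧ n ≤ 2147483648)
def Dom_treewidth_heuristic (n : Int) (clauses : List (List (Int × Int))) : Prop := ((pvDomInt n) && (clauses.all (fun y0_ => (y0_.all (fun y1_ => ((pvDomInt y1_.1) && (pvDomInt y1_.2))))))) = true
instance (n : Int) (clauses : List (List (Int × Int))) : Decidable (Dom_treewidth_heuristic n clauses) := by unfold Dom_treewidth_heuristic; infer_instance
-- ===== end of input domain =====

-- B maintains the min-degree key table incrementally (only vertices touched by fill edges /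
-- the eliminated vertex are updated) instead of recomputing every |adj[x] & remaining| each
-- round: a structurally different bookkeeping of the same greedy elimination.
-- Python-set note: both programs take min over / intersect with `remaining = set(range(n))`;
-- for 0..n-1 CPython's set iteration order is ascending insertion order, which is exactly the
-- ordered dup-free list PySem.Set models, so the min tie-break and all set ops are exact here.
-- `list(neighbors)` order only feeds symmetric all-pairs edge insertion, so it cannot affect
-- the result.

-- ===== PORT A =====
def treewidth_heuristic (n : Int) (clauses : List (List (Int × Int))) : Int :=
  -- adj = defaultdict(set); nested index loops add both directions for every i<j pair
  let adj : PySem.Dict Int (PySem.Set Int) :=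
    clauses.foldl (fun adj clause =>
      let vs := clause.map (fun lit => lit.1)
      (PySem.List.pyRange 0 (PySem.List.len vs)).foldl (fun adj i =>
        (PySem.List.pyRange (i+1) (PySem.List.len vs)).foldl (fun adj j =>
          let adj := adj.modify (PySem.List.pyGetD vs i 0) [] (fun s => PySem.Set.add s (PySem.List.pyGetD vs j 0))
          adj.modify (PySem.List.pyGetD vs j 0) [] (fun s => PySem.Set.add s (PySem.List.pyGetD vs i 0))) adj) adj)
      PySem.Dict.empty
  let remaining : PySem.Set Int := PySem.Set.ofList (PySem.List.pyRange 0 n)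
  -- for _ in range(n): if not remaining: break; …
  let st := (PySem.List.pyRange 0 n).foldl
    (fun (st : PySem.Dict Int (PySem.Set Int) × PySem.Set Int × Int) _ =>
      let adj := st.1; let remaining := st.2.1; let tw := st.2.2
      if remaining = [] then st
      else
        match PySem.List.min? remaining (fun x => PySem.Set.len (PySem.Set.inter (adj.getD x []) remaining)) with
        | none => st   -- unreachable: remaining ≠ []
        | some v =>
          let neighbors := PySem.Set.inter (adj.getD v []) remaining
          let tw := max tw (PySem.Set.len neighbors)
          let nbList : List Int := neighbors
          let adj := (PySem.List.pyRange 0 (PySem.List.len nbList)).foldl (fun adj i =>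
            (PySem.List.pyRange (i+1) (PySem.List.len nbList)).foldl (fun adj j =>
              let adj := adj.modify (PySem.List.pyGetD nbList i 0) [] (fun s => PySem.Set.add s (PySem.List.pyGetD nbList j 0))
              adj.modify (PySem.List.pyGetD nbList j 0) [] (fun s => PySem.Set.add s (PySem.List.pyGetD nbList i 0))) adj) adj
          -- remaining.remove(v): v = min of the nonempty remaining is a member, so remove = discard
          (adj, PySem.Set.discard remaining v, tw))
    (adj, remaining, (0 : Int))
  st.2.2

-- ===== PORT B =====
-- while remaining: … — recursion on the shrinking remaining set
def twLoop (adj : PySem.Dict Int (PySem.Set Int)) (deg : PySem.Dict Int Int)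
    (remaining : PySem.Set Int) (tw : Int) : Int :=
  if remaining = [] then tw
  else
    match hv : PySem.List.min? remaining (fun x => deg.getD x 0) with
    | none => tw   -- unreachable: remaining ≠ []
    | some v =>
      let neighbors := PySem.Set.inter (adj.getD v []) remaining
      let tw' := max tw (PySem.Set.len neighbors)
      -- fill edges, bumping deg only when an edge is really new
      let p := (PySem.List.enumerate neighbors).foldl
        (fun (p : PySem.Dict Int (PySem.Set Int) × PySem.Dict Int Int) ia =>
          (PySem.List.slice neighbors (some (ia.1+1)) none).foldl
            (fun (p : PySem.Dict Int (PySem.Set Int) × PySem.Dict Int Int) b =>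
              let p := if (p.1.getD ia.2 []).contains b then p
                       else (p.1.modify ia.2 [] (fun s => PySem.Set.add s b), p.2.modify ia.2 0 (· + 1))
              if (p.1.getD b []).contains ia.2 then p
              else (p.1.modify b [] (fun s => PySem.Set.add s ia.2), p.2.modify b 0 (· + 1))) p) (adj, deg)
      -- remaining.remove(v); every surviving neighbor loses v from its degree
      let deg' := neighbors.foldl (fun d u => if u = v then d else d.modify u 0 (· - 1)) p.2
      twLoop p.1 deg' (PySem.Set.discard remaining v) tw'
termination_by remaining.length
decreasing_by
  have hvmem : v ∈ remaining := PySem.List.min?_mem hv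
  simp only [PySem.Set.discard]
  exact List.length_filter_lt_length_iff_exists.mpr ⟨v, hvmem, by simp⟩

def treewidth_heuristic_alt (n : Int) (clauses : List (List (Int × Int))) : Int :=
  let adj : PySem.Dict Int (PySem.Set Int) :=
    clauses.foldl (fun adj clause =>
      let vs := clause.map (fun lit => lit.1)
      (PySem.List.enumerate vs).foldl (fun adj ia =>
        (PySem.List.slice vs (some (ia.1+1)) none).foldl (fun adj b =>
          let adj := adj.modify ia.2 [] (fun s => PySem.Set.add s b)
          adj.modify b [] (fun s => PySem.Set.add s ia.2)) adj) adj)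
      PySem.Dict.empty
  let remaining : PySem.Set Int := PySem.Set.ofList (PySem.List.pyRange 0 n)
  let deg : PySem.Dict Int Int :=
    (PySem.List.pyRange 0 n).foldl
      (fun d x => d.insert x (PySem.Set.len (PySem.Set.inter (adj.getD x []) remaining)))
      PySem.Dict.empty
  twLoop adj deg remaining 0

-- ===== PRECONDITION & SPEC =====
def Spec_treewidth_heuristic (n : Int) (clauses : List (List (Int × Int))) (out : Int) : Prop := out = treewidth_heuristic_alt n clauses
instance (n : Int) (clauses : List (List (Int × Int))) (out : Int) : Decidable (Spec_treewidth_heuristic n clauses out) := by unfold Spec_treewidth_heuristic; infer_instance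

-- ===== CLAIM (what is proved, stated in full; the proofs are below) =====
def Claim_equal_treewidth_heuristic : Prop := ∀ (n : Int) (clauses : List (List (Int × Int))), Dom_treewidth_heuristic n clauses → Spec_treewidth_heuristic n clauses (treewidth_heuristic n clauses)

-- ===== LEMMAS AND PROOFS =====

def twAddE (adj : PySem.Dict Int (PySem.Set Int)) (a b : Int) : PySem.Dict Int (PySem.Set Int) :=
  (adj.modify a [] (fun s => PySem.Set.add s b)).modify b [] (fun s => PySem.Set.add s a)

lemma twAddE_getD (adj : PySem.Dict Int (PySem.Set Int)) (a b x : Int) :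
    (twAddE adj a b).getD x [] =
      if x = b then PySem.Set.add (if b = a then PySem.Set.add (adj.getD a []) b else adj.getD b []) a
      else if x = a then PySem.Set.add (adj.getD a []) b
      else adj.getD x [] := by
  simp only [twAddE, PySem.Dict.getD_modify]

lemma twAddE_mem (adj : PySem.Dict Int (PySem.Set Int)) (a b c x : Int) :
    x ∈ (twAddE adj a b).getD c [] ↔ x ∈ adj.getD c [] ∨ (c = a ∧ x = b) ∨ (c = b ∧ x = a) := by
  rw [twAddE_getD]
  split_ifs with h1 h2 h3 <;>
    (try simp only [PySem.Set.mem_add]) <;> subst_vars <;> tauto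

lemma twAddE_nodup (adj : PySem.Dict Int (PySem.Set Int)) (a b : Int)
    (h : ∀ x, (adj.getD x []).Nodup) : ∀ x, ((twAddE adj a b).getD x []).Nodup := by
  intro x
  rw [twAddE_getD]
  split_ifs with h1 h2 h3
  · exact PySem.Set.nodup_add _ _ (PySem.Set.nodup_add _ _ (h a))
  · exact PySem.Set.nodup_add _ _ (h b)
  · exact PySem.Set.nodup_add _ _ (h a)
  · exact h x

def twMinStep (key : Int → Int) (acc : Option Int) (x : Int) : Option Int :=
  match acc with
  | none => some x
  | some m => if key x < key m then some x else some m

lemma twMin?_eq (xs : List Int) (key : Int → Int) :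
    PySem.List.min? xs key = xs.foldl (twMinStep key) none := by
  unfold PySem.List.min?
  congr 1
  funext acc x
  cases acc <;> rfl

lemma twMin_congr {k1 k2 : Int → Int} : ∀ (xs : List Int) (acc : Option Int),
    (∀ x ∈ xs, k1 x = k2 x) → (∀ m, acc = some m → k1 m = k2 m) →
    xs.foldl (twMinStep k1) acc = xs.foldl (twMinStep k2) acc := by
  intro xs
  induction xs with
  | nil => intro acc _ _; rfl
  | cons x xs ih =>
    intro acc h hacc
    simp only [List.foldl_cons]
    have hx : k1 x = k2 x := h x (by simp)
    have hxs : ∀ y ∈ xs, k1 y = k2 y := fun y hy => h y (by simp [hy])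
    cases acc with
    | none =>
      show List.foldl (twMinStep k1) (some x) xs = List.foldl (twMinStep k2) (some x) xs
      exact ih (some x) hxs (fun m hm => by cases hm; exact hx)
    | some m =>
      have hm : k1 m = k2 m := hacc m rfl
      show List.foldl (twMinStep k1) (if k1 x < k1 m then some x else some m) xs
         = List.foldl (twMinStep k2) (if k2 x < k2 m then some x else some m) xs
      rw [hx, hm]
      split_ifs with hlt
      · exact ih (some x) hxs (fun m' hm' => by cases hm'; exact hx)
      · exact ih (some m) hxs (fun m' hm' => by cases hm'; exact hm)

lemma twMin?_congr (xs : List Int) (k1 k2 : Int → Int) (h : ∀ x ∈ xs, k1 x = k2 x) :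
    PySem.List.min? xs k1 = PySem.List.min? xs k2 := by
  rw [twMin?_eq, twMin?_eq]
  exact twMin_congr xs none h (fun m hm => nomatch hm)

lemma twDecFold (v : Int) : ∀ (l : List Int) (deg : PySem.Dict Int Int) (x : Int), l.Nodup →
    (l.foldl (fun d u => if u = v then d else d.modify u 0 (· - 1)) deg).getD x 0
      = deg.getD x 0 - (if x ∈ l ∧ x ≠ v then 1 else 0) := by
  intro l
  induction l with
  | nil => intro deg x _; simp
  | cons u l ih =>
    intro deg x hnd
    simp only [List.foldl_cons]
    have hul : u ∉ l := (List.nodup_cons.1 hnd).1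
    rw [ih _ x (List.nodup_cons.1 hnd).2]
    by_cases huv : u = v
    · subst huv
      rw [if_pos rfl]
      simp only [List.mem_cons]
      by_cases hx : x ∈ l ∧ x ≠ u
      · rw [if_pos hx, if_pos ⟨Or.inr hx.1, hx.2⟩]
      · rw [if_neg hx]
        have : ¬((x = u ∨ x ∈ l) ∧ x ≠ u) := by tauto
        rw [if_neg this]
    · rw [if_neg huv, PySem.Dict.getD_modify]
      by_cases hxu : x = u
      · subst hxu
        rw [if_pos rfl, if_neg (by simp [hul]), if_pos ⟨by simp, huv⟩]
        omega
      · rw [if_neg hxu]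
        simp only [List.mem_cons]
        have : (x = u ∨ x ∈ l) ∧ x ≠ v ↔ x ∈ l ∧ x ≠ v := by tauto
        rw [if_congr this rfl rfl]

lemma twDegInit (f : Int → Int) : ∀ (l : List Int) (d : PySem.Dict Int Int) (x : Int),
    (l.foldl (fun d x => d.insert x (f x)) d).getD x 0 = if x ∈ l then f x else d.getD x 0 := by
  intro l
  induction l with
  | nil => intro d x; simp
  | cons y l ih =>
    intro d x
    simp only [List.foldl_cons]
    rw [ih]
    rw [PySem.Dict.getD_insert]
    simp only [List.mem_cons]
    by_cases h1 : x ∈ l <;> by_cases h2 : x = y <;> simp [h1, h2]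

lemma twInterDiscard (s rem : PySem.Set Int) (v : Int) :
    PySem.Set.inter s (PySem.Set.discard rem v) = PySem.Set.discard (PySem.Set.inter s rem) v := by
  simp only [PySem.Set.inter, PySem.Set.discard, List.filter_filter]
  apply List.filter_congr
  intro y _
  by_cases hy : y = v <;> by_cases hm : y ∈ rem <;>
    simp [hy, hm, List.mem_filter]

lemma twLenDiscard (s : PySem.Set Int) (v : Int) (hnd : List.Nodup s) :
    PySem.Set.len (PySem.Set.discard s v) = PySem.Set.len s - (if v ∈ s then 1 else 0) := by
  simp only [PySem.Set.len, PySem.Set.discard]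
  have hfun : (fun y : Int => !(y == v)) = (fun y : Int => y != v) := rfl
  rw [hfun, ← List.Nodup.erase_eq_filter hnd v]
  by_cases hv : v ∈ s
  · rw [if_pos hv, List.length_erase_of_mem hv]
    have : 1 ≤ s.length := List.length_pos_of_mem hv
    omega
  · rw [if_neg hv, List.erase_of_not_mem hv]; omega


def twPairRec {σ : Type} (g : σ → Int → Int → σ) : List Int → σ → σ
  | [], s => s
  | a :: rest, s => twPairRec g rest (rest.foldl (fun s b => g s a b) s)

lemma twDrop_aux {σ : Type} (g : σ → Int → Int → σ) (vs : List Int) :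
    ∀ (m k : Nat), vs.length - k = m → k ≤ vs.length → ∀ (s : σ),
      (PySem.List.pyRange (k:Int) (PySem.List.len vs)).foldl
        (fun s i => (vs.drop (i+1).toNat).foldl (fun s b => g s (PySem.List.pyGetD vs i 0) b) s) s
      = twPairRec g (vs.drop k) s := by
  intro m
  induction m with
  | zero =>
    intro k hm hk s
    have hk' : k = vs.length := by omega
    subst hk'
    rw [PySem.List.pyRange_one_eq_nil (by simp [PySem.List.len])]
    simp [twPairRec]
  | succ m ih =>
    intro k hm hk s
    have hklt : k < vs.length := by omega
    have hlt : (k:Int) < PySem.List.len vs := by simp [PySem.List.len]; exact_mod_cast hklt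
    rw [PySem.List.pyRange_one_cons hlt, List.foldl_cons]
    have hdrop : vs.drop k = vs[k] :: vs.drop (k+1) := List.drop_eq_getElem_cons hklt
    have hget : PySem.List.pyGetD vs (k:Int) 0 = vs[k] := by
      rw [PySem.List.pyGetD_of_nonneg _ _ (by positivity)]
      simp [List.getD_eq_getElem?_getD, List.getElem?_eq_getElem hklt]
    have htn : ((k:Int)+1).toNat = k+1 := by omega
    have hcast : (k:Int)+1 = ((k+1 : Nat) : Int) := by push_cast; ring
    rw [htn, hget, hcast, ih (k+1) (by omega) (by omega), hdrop]
    rfl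

lemma twDrop_eq_pairRec {σ : Type} (g : σ → Int → Int → σ) :
    ∀ (vs : List Int) (s : σ),
      (PySem.List.pyRange 0 (PySem.List.len vs)).foldl
        (fun s i => (vs.drop (i+1).toNat).foldl (fun s b => g s (PySem.List.pyGetD vs i 0) b) s) s
      = twPairRec g vs s := by
  intro vs s
  have := twDrop_aux g vs (vs.length) 0 (by omega) (by omega) s
  simpa using this

lemma twShapeA_eq {σ : Type} (g : σ → Int → Int → σ) (vs : List Int) (s : σ) :
    (PySem.List.pyRange 0 (PySem.List.len vs)).foldl
      (fun s i => (PySem.List.pyRange (i+1) (PySem.List.len vs)).foldl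
        (fun s j => g s (PySem.List.pyGetD vs i 0) (PySem.List.pyGetD vs j 0)) s) s
    = twPairRec g vs s := by
  rw [← twDrop_eq_pairRec]
  apply PySem.List.foldl_congr_mem
  intro acc i hi
  have h0 : (0:Int) ≤ i := ((PySem.List.mem_pyRange_one.1 hi).1)
  exact PySem.List.foldl_pyRange_pyGetD vs 0 (fun s b => g s (PySem.List.pyGetD vs i 0) b) acc (by omega)

lemma twShapeB_eq {σ : Type} (g : σ → Int → Int → σ) (vs : List Int) (s : σ) :
    (PySem.List.enumerate vs).foldl
      (fun s ia => (PySem.List.slice vs (some (ia.1+1)) none).foldl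
        (fun s b => g s ia.2 b) s) s
    = twPairRec g vs s := by
  rw [← twDrop_eq_pairRec]
  rw [PySem.List.enumerate_eq_map_pyRange vs 0, List.foldl_map]
  apply PySem.List.foldl_congr_mem
  intro acc i hi
  have h0 : (0:Int) ≤ i := ((PySem.List.mem_pyRange_one.1 hi).1)
  rw [PySem.List.slice_from vs (by omega : (0:Int) ≤ i + 1)]

lemma twInner_mem (a : Int) : ∀ (rest : List Int) (adj : PySem.Dict Int (PySem.Set Int)) (c x : Int),
    (x ∈ (rest.foldl (fun s b => twAddE s a b) adj).getD c [] ↔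
      x ∈ adj.getD c [] ∨ (c = a ∧ x ∈ rest) ∨ (x = a ∧ c ∈ rest)) := by
  intro rest
  induction rest with
  | nil => intro adj c x; simp
  | cons b rest ih =>
    intro adj c x
    simp only [List.foldl_cons]
    rw [ih, twAddE_mem]
    simp only [List.mem_cons]
    tauto

lemma twInner_nodup (a : Int) : ∀ (rest : List Int) (adj : PySem.Dict Int (PySem.Set Int)),
    (∀ x, (adj.getD x []).Nodup) →
    ∀ x, ((rest.foldl (fun s b => twAddE s a b) adj).getD x []).Nodup := by
  intro rest
  induction rest with
  | nil => intro adj h x; exact h x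
  | cons b rest ih =>
    intro adj h x
    simp only [List.foldl_cons]
    exact ih _ (twAddE_nodup adj a b h) x

lemma twPairRec_nodup : ∀ (l : List Int) (adj : PySem.Dict Int (PySem.Set Int)),
    (∀ x, (adj.getD x []).Nodup) →
    ∀ x, ((twPairRec twAddE l adj).getD x []).Nodup := by
  intro l
  induction l with
  | nil => intro adj h x; exact h x
  | cons a rest ih =>
    intro adj h x
    exact ih _ (twInner_nodup a rest adj h) x

lemma twPairRec_mem : ∀ (l : List Int) (adj : PySem.Dict Int (PySem.Set Int)), l.Nodup →
    ∀ c x, (x ∈ (twPairRec twAddE l adj).getD c [] ↔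
      x ∈ adj.getD c [] ∨ (c ∈ l ∧ x ∈ l ∧ c ≠ x)) := by
  intro l
  induction l with
  | nil => intro adj _ c x; simp [twPairRec]
  | cons a rest ih =>
    intro adj hnd c x
    have har : a ∉ rest := (List.nodup_cons.1 hnd).1
    have hrr : rest.Nodup := (List.nodup_cons.1 hnd).2
    show x ∈ (twPairRec twAddE rest (rest.foldl (fun s b => twAddE s a b) adj)).getD c [] ↔ _
    rw [ih _ hrr c x, twInner_mem a rest adj c x]
    simp only [List.mem_cons]
    constructor
    · rintro ((h | ⟨hc, hx⟩ | ⟨hx, hc⟩) | ⟨hc, hx, hne⟩)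
      · exact Or.inl h
      · have hxa : x ≠ a := fun he => har (he ▸ hx)
        exact Or.inr ⟨Or.inl hc, Or.inr hx, by rw [hc]; exact fun he => hxa he.symm⟩
      · have hca : c ≠ a := fun he => har (he ▸ hc)
        exact Or.inr ⟨Or.inr hc, Or.inl hx, by rw [hx]; exact hca⟩
      · exact Or.inr ⟨Or.inr hc, Or.inr hx, hne⟩
    · rintro (h | ⟨(hc | hc), (hx | hx), hne⟩)
      · exact Or.inl (Or.inl h)
      · exact absurd (by rw [hc, hx] : c = x) hne
      · exact Or.inl (Or.inr (Or.inl ⟨hc, hx⟩))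
      · exact Or.inl (Or.inr (Or.inr ⟨hx, hc⟩))
      · exact Or.inr ⟨hc, hx, hne⟩


lemma twPairRec_sym : ∀ (l : List Int) (adj : PySem.Dict Int (PySem.Set Int)),
    (∀ a b : Int, a ∈ adj.getD b [] ↔ b ∈ adj.getD a []) →
    ∀ a b : Int, a ∈ (twPairRec twAddE l adj).getD b [] ↔ b ∈ (twPairRec twAddE l adj).getD a [] := by
  intro l
  induction l with
  | nil => intro adj h a b; exact h a b
  | cons a rest ih =>
    intro adj h u v
    apply ih
    intro p q
    rw [twInner_mem, twInner_mem]
    have := h p q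
    tauto

def twGB (p : PySem.Dict Int (PySem.Set Int) × PySem.Dict Int Int) (a b : Int) :
    PySem.Dict Int (PySem.Set Int) × PySem.Dict Int Int :=
  let p := if (p.1.getD a []).contains b then p
           else (p.1.modify a [] (fun s => PySem.Set.add s b), p.2.modify a 0 (· + 1))
  if (p.1.getD b []).contains a then p
  else (p.1.modify b [] (fun s => PySem.Set.add s a), p.2.modify b 0 (· + 1))

def twHalfA (adj : PySem.Dict Int (PySem.Set Int)) (k e : Int) : PySem.Dict Int (PySem.Set Int) :=
  adj.modify k [] (fun s => PySem.Set.add s e)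

def twHalfB (p : PySem.Dict Int (PySem.Set Int) × PySem.Dict Int Int) (k e : Int) :
    PySem.Dict Int (PySem.Set Int) × PySem.Dict Int Int :=
  if (p.1.getD k []).contains e then p
  else (p.1.modify k [] (fun s => PySem.Set.add s e), p.2.modify k 0 (· + 1))

lemma twAddE_eq_half (adj : PySem.Dict Int (PySem.Set Int)) (a b : Int) :
    twAddE adj a b = twHalfA (twHalfA adj a b) b a := rfl

lemma twGB_eq_half (p : PySem.Dict Int (PySem.Set Int) × PySem.Dict Int Int) (a b : Int) :
    twGB p a b = twHalfB (twHalfB p a b) b a := rfl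

lemma twHalfB_fst (p : PySem.Dict Int (PySem.Set Int) × PySem.Dict Int Int)
    (adj : PySem.Dict Int (PySem.Set Int)) (k e : Int)
    (hAB : ∀ x, p.1.getD x [] = adj.getD x []) :
    ∀ x, (twHalfB p k e).1.getD x [] = (twHalfA adj k e).getD x [] := by
  intro x
  simp only [twHalfA, twHalfB]
  by_cases h1 : (p.1.getD k []).contains e
  · rw [if_pos h1, PySem.Dict.getD_modify]
    by_cases hx : x = k
    · subst hx
      rw [if_pos rfl, ← hAB x]
      have h1' : e ∈ p.1.getD x [] := (PySem.Set.contains_iff _ _).1 h1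
      simp [PySem.Set.add, h1']
    · rw [if_neg hx]; exact hAB x
  · rw [if_neg h1]
    show (p.1.modify k [] fun s => PySem.Set.add s e).getD x [] = _
    rw [PySem.Dict.getD_modify, PySem.Dict.getD_modify]
    by_cases hx : x = k <;> simp [hx, hAB]

lemma twHalfB_nodup (p : PySem.Dict Int (PySem.Set Int) × PySem.Dict Int Int) (k e : Int)
    (hnd : ∀ x, (p.1.getD x []).Nodup) :
    ∀ x, ((twHalfB p k e).1.getD x []).Nodup := by
  intro x
  simp only [twHalfB]
  by_cases h1 : (p.1.getD k []).contains e
  · rw [if_pos h1]; exact hnd x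
  · rw [if_neg h1]
    show ((p.1.modify k [] fun s => PySem.Set.add s e).getD x []).Nodup
    rw [PySem.Dict.getD_modify]
    by_cases hx : x = k
    · rw [if_pos hx]; exact PySem.Set.nodup_add _ _ (hnd k)
    · rw [if_neg hx]; exact hnd x

lemma twLenInterAdd (s rem : PySem.Set Int) (e : Int) (he : e ∈ rem) :
    PySem.Set.len (PySem.Set.inter (s ++ [e]) rem) = PySem.Set.len (PySem.Set.inter s rem) + 1 := by
  simp only [PySem.Set.inter, PySem.Set.len, List.filter_append]
  have hc : rem.contains e = true := (PySem.Set.contains_iff _ _).2 he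
  have : List.filter (fun x => rem.contains x) [e] = [e] := by
    simp [he]
  rw [this]
  simp

lemma twHalfB_deg (rem : PySem.Set Int) (p : PySem.Dict Int (PySem.Set Int) × PySem.Dict Int Int)
    (k e : Int) (he : e ∈ rem)
    (hP : ∀ x ∈ rem, p.2.getD x 0 = PySem.Set.len (PySem.Set.inter (p.1.getD x []) rem)) :
    ∀ x ∈ rem, (twHalfB p k e).2.getD x 0
      = PySem.Set.len (PySem.Set.inter ((twHalfB p k e).1.getD x []) rem) := by
  intro x hx
  simp only [twHalfB]
  by_cases h1 : (p.1.getD k []).contains e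
  · rw [if_pos h1]; exact hP x hx
  · rw [if_neg h1]
    show (p.2.modify k 0 (· + 1)).getD x 0
        = PySem.Set.len (PySem.Set.inter ((p.1.modify k [] fun s => PySem.Set.add s e).getD x []) rem)
    rw [PySem.Dict.getD_modify, PySem.Dict.getD_modify]
    by_cases hxk : x = k
    · rw [if_pos hxk, if_pos hxk]
      have hne : e ∉ p.1.getD k [] := fun hm => h1 ((PySem.Set.contains_iff _ _).2 hm)
      have hadd : PySem.Set.add (p.1.getD k []) e = p.1.getD k [] ++ [e] := by
        simp [PySem.Set.add, hne]
      rw [hadd, twLenInterAdd _ _ _ he, hP k (hxk ▸ hx)]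
    · rw [if_neg hxk, if_neg hxk]; exact hP x hx

lemma twGB_fst (p : PySem.Dict Int (PySem.Set Int) × PySem.Dict Int Int)
    (adjA : PySem.Dict Int (PySem.Set Int)) (a b : Int)
    (hAB : ∀ x, p.1.getD x [] = adjA.getD x []) :
    ∀ x, ((twGB p a b).1).getD x [] = (twAddE adjA a b).getD x [] := by
  rw [twGB_eq_half, twAddE_eq_half]
  exact twHalfB_fst _ _ b a (twHalfB_fst _ _ a b hAB)

lemma twGB_nodup (p : PySem.Dict Int (PySem.Set Int) × PySem.Dict Int Int) (a b : Int)
    (hnd : ∀ x, (p.1.getD x []).Nodup) :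
    ∀ x, ((twGB p a b).1.getD x []).Nodup := by
  rw [twGB_eq_half]
  exact twHalfB_nodup _ b a (twHalfB_nodup _ a b hnd)

lemma twGB_deg (rem : PySem.Set Int) (p : PySem.Dict Int (PySem.Set Int) × PySem.Dict Int Int)
    (a b : Int) (ha : a ∈ rem) (hb : b ∈ rem)
    (hP : ∀ x ∈ rem, p.2.getD x 0 = PySem.Set.len (PySem.Set.inter (p.1.getD x []) rem)) :
    ∀ x ∈ rem, (twGB p a b).2.getD x 0
      = PySem.Set.len (PySem.Set.inter ((twGB p a b).1.getD x []) rem) := by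
  rw [twGB_eq_half]
  exact twHalfB_deg rem _ b a ha (twHalfB_deg rem _ a b hb hP)

-- lifts of the twGB step lemmas to the inner fold and to twPairRec
lemma twFillFold_fst (a : Int) : ∀ (rest : List Int)
    (p : PySem.Dict Int (PySem.Set Int) × PySem.Dict Int Int) (adjA : PySem.Dict Int (PySem.Set Int)),
    (∀ x, p.1.getD x [] = adjA.getD x []) →
    ∀ x, ((rest.foldl (fun p b => twGB p a b) p).1).getD x []
        = (rest.foldl (fun s b => twAddE s a b) adjA).getD x [] := by
  intro rest
  induction rest with
  | nil => intro p adjA h x; exact h x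
  | cons b rest ih =>
    intro p adjA h x
    simp only [List.foldl_cons]
    exact ih _ _ (twGB_fst p adjA a b h) x

lemma twPairRecGB_fst : ∀ (l : List Int)
    (p : PySem.Dict Int (PySem.Set Int) × PySem.Dict Int Int) (adjA : PySem.Dict Int (PySem.Set Int)),
    (∀ x, p.1.getD x [] = adjA.getD x []) →
    ∀ x, ((twPairRec twGB l p).1).getD x [] = (twPairRec twAddE l adjA).getD x [] := by
  intro l
  induction l with
  | nil => intro p adjA h x; exact h x
  | cons a rest ih =>
    intro p adjA h x
    exact ih _ _ (twFillFold_fst a rest p adjA h) x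

lemma twFillFold_inv (rem : PySem.Set Int) (a : Int) (ha : a ∈ rem) :
    ∀ (rest : List Int) (p : PySem.Dict Int (PySem.Set Int) × PySem.Dict Int Int),
    (∀ b ∈ rest, b ∈ rem) →
    (∀ x, (p.1.getD x []).Nodup) →
    (∀ x ∈ rem, p.2.getD x 0 = PySem.Set.len (PySem.Set.inter (p.1.getD x []) rem)) →
    (∀ x, ((rest.foldl (fun p b => twGB p a b) p).1.getD x []).Nodup) ∧
    (∀ x ∈ rem, (rest.foldl (fun p b => twGB p a b) p).2.getD x 0
      = PySem.Set.len (PySem.Set.inter ((rest.foldl (fun p b => twGB p a b) p).1.getD x []) rem)) := by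
  intro rest
  induction rest with
  | nil => intro p _ hnd hP; exact ⟨hnd, hP⟩
  | cons b rest ih =>
    intro p hmem hnd hP
    simp only [List.foldl_cons]
    exact ih _ (fun c hc => hmem c (by simp [hc]))
      (twGB_nodup p a b hnd)
      (twGB_deg rem p a b ha (hmem b (by simp)) hP)

lemma twPairRecGB_inv (rem : PySem.Set Int) : ∀ (l : List Int)
    (p : PySem.Dict Int (PySem.Set Int) × PySem.Dict Int Int),
    (∀ b ∈ l, b ∈ rem) →
    (∀ x, (p.1.getD x []).Nodup) →
    (∀ x ∈ rem, p.2.getD x 0 = PySem.Set.len (PySem.Set.inter (p.1.getD x []) rem)) →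
    (∀ x, ((twPairRec twGB l p).1.getD x []).Nodup) ∧
    (∀ x ∈ rem, (twPairRec twGB l p).2.getD x 0
      = PySem.Set.len (PySem.Set.inter ((twPairRec twGB l p).1.getD x []) rem)) := by
  intro l
  induction l with
  | nil => intro p _ hnd hP; exact ⟨hnd, hP⟩
  | cons a rest ih =>
    intro p hmem hnd hP
    have ha : a ∈ rem := hmem a (by simp)
    have hrest : ∀ b ∈ rest, b ∈ rem := fun b hb => hmem b (by simp [hb])
    obtain ⟨hnd', hP'⟩ := twFillFold_inv rem a ha rest p hrest hnd hP
    exact ih _ hrest hnd' hP'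

-- A-side step in clean form
def twFillA (vs : List Int) (adj : PySem.Dict Int (PySem.Set Int)) : PySem.Dict Int (PySem.Set Int) :=
  (PySem.List.pyRange 0 (PySem.List.len vs)).foldl (fun adj i =>
    (PySem.List.pyRange (i+1) (PySem.List.len vs)).foldl (fun adj j =>
      let adj := adj.modify (PySem.List.pyGetD vs i 0) [] (fun s => PySem.Set.add s (PySem.List.pyGetD vs j 0))
      adj.modify (PySem.List.pyGetD vs j 0) [] (fun s => PySem.Set.add s (PySem.List.pyGetD vs i 0))) adj) adj

lemma twFillA_eq (vs : List Int) (adj : PySem.Dict Int (PySem.Set Int)) :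
    twFillA vs adj = twPairRec twAddE vs adj := twShapeA_eq twAddE vs adj

def twStepA (st : PySem.Dict Int (PySem.Set Int) × PySem.Set Int × Int) :
    PySem.Dict Int (PySem.Set Int) × PySem.Set Int × Int :=
  let adj := st.1; let remaining := st.2.1; let tw := st.2.2
  if remaining = [] then st
  else
    match PySem.List.min? remaining (fun x => PySem.Set.len (PySem.Set.inter (adj.getD x []) remaining)) with
    | none => st
    | some v =>
      let neighbors := PySem.Set.inter (adj.getD v []) remaining
      (twFillA neighbors adj, PySem.Set.discard remaining v, max tw (PySem.Set.len neighbors))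

lemma twStepA_empty : ∀ (l : List Int) (adj : PySem.Dict Int (PySem.Set Int)) (tw : Int),
    l.foldl (fun st _ => twStepA st) (adj, ([] : PySem.Set Int), tw) = (adj, ([] : PySem.Set Int), tw) := by
  intro l
  induction l with
  | nil => intro adj tw; rfl
  | cons e l ih => intro adj tw; simp only [List.foldl_cons, twStepA]; exact ih adj tw

lemma twStepA_step (adj : PySem.Dict Int (PySem.Set Int)) (rem : PySem.Set Int) (tw : Int) (v : Int)
    (hrem : ¬ rem = [])
    (hmin : PySem.List.min? rem (fun x => PySem.Set.len (PySem.Set.inter (adj.getD x []) rem)) = some v) :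
    twStepA (adj, rem, tw)
      = (twPairRec twAddE (PySem.Set.inter (adj.getD v []) rem) adj,
         PySem.Set.discard rem v,
         max tw (PySem.Set.len (PySem.Set.inter (adj.getD v []) rem))) := by
  simp only [twStepA]
  rw [if_neg hrem]
  split
  · rename_i heq
    rw [hmin] at heq
    cases heq
  · rename_i v' heq
    rw [hmin] at heq
    injection heq with h
    subst h
    rw [twFillA_eq]

lemma twLoop_step (adj : PySem.Dict Int (PySem.Set Int)) (deg : PySem.Dict Int Int)
    (rem : PySem.Set Int) (tw : Int) (v : Int)
    (hrem : ¬ rem = [])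
    (hmin : PySem.List.min? rem (fun x => deg.getD x 0) = some v) :
    twLoop adj deg rem tw
      = twLoop (twPairRec twGB (PySem.Set.inter (adj.getD v []) rem) (adj, deg)).1
          ((PySem.Set.inter (adj.getD v []) rem).foldl
            (fun d u => if u = v then d else d.modify u 0 (· - 1))
            (twPairRec twGB (PySem.Set.inter (adj.getD v []) rem) (adj, deg)).2)
          (PySem.Set.discard rem v)
          (max tw (PySem.Set.len (PySem.Set.inter (adj.getD v []) rem))) := by
  conv_lhs => rw [twLoop]
  rw [if_neg hrem]
  split
  · rename_i heq
    rw [hmin] at heq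
    cases heq
  · rename_i v' heq
    rw [hmin] at heq
    injection heq with h
    subst h
    show twLoop
        ((PySem.List.enumerate (PySem.Set.inter (adj.getD v []) rem)).foldl
          (fun p ia => (PySem.List.slice (PySem.Set.inter (adj.getD v []) rem) (some (ia.1+1)) none).foldl
            (fun p b => twGB p ia.2 b) p) (adj, deg)).1
        ((PySem.Set.inter (adj.getD v []) rem).foldl
          (fun d u => if u = v then d else d.modify u 0 (· - 1))
          ((PySem.List.enumerate (PySem.Set.inter (adj.getD v []) rem)).foldl
            (fun p ia => (PySem.List.slice (PySem.Set.inter (adj.getD v []) rem) (some (ia.1+1)) none).foldl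
              (fun p b => twGB p ia.2 b) p) (adj, deg)).2)
        (PySem.Set.discard rem v)
        (max tw (PySem.Set.len (PySem.Set.inter (adj.getD v []) rem)))
      = _
    rw [twShapeB_eq twGB (PySem.Set.inter (adj.getD v []) rem) (adj, deg)]

lemma twLoop_main : ∀ (l : List Int) (adjA adjB : PySem.Dict Int (PySem.Set Int))
    (deg : PySem.Dict Int Int) (rem : PySem.Set Int) (tw : Int),
    (∀ x, adjA.getD x [] = adjB.getD x []) →
    rem.Nodup →
    (∀ x, (adjA.getD x []).Nodup) →
    (∀ a b : Int, a ∈ adjA.getD b [] ↔ b ∈ adjA.getD a []) →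
    (∀ x ∈ rem, deg.getD x 0 = PySem.Set.len (PySem.Set.inter (adjA.getD x []) rem)) →
    rem.length ≤ l.length →
    (l.foldl (fun st _ => twStepA st) (adjA, rem, tw)).2.2 = twLoop adjB deg rem tw := by
  intro l
  induction l with
  | nil =>
    intro adjA adjB deg rem tw hAB hndr hnd hsym hdeg hlen
    have hrem : rem = [] := by
      cases rem with
      | nil => rfl
      | cons a t => simp at hlen
    subst hrem
    rw [List.foldl_nil, twLoop, if_pos rfl]
  | cons e l ih =>
    intro adjA adjB deg rem tw hAB hndr hnd hsym hdeg hlen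
    by_cases hrem : rem = []
    · subst hrem
      rw [twStepA_empty (e :: l) adjA tw, twLoop, if_pos rfl]
    · -- one elimination round
      obtain ⟨v, hm⟩ : ∃ v, PySem.List.min? rem
          (fun x => PySem.Set.len (PySem.Set.inter (adjA.getD x []) rem)) = some v := by
        cases hc : PySem.List.min? rem (fun x => PySem.Set.len (PySem.Set.inter (adjA.getD x []) rem)) with
        | none => exact absurd ((PySem.List.min?_eq_none_iff _ _).1 hc) hrem
        | some v => exact ⟨v, rfl⟩
      have hv : v ∈ rem := PySem.List.min?_mem hm
      have hminB : PySem.List.min? rem (fun x => deg.getD x 0) = some v := by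
        rw [twMin?_congr rem (fun x => deg.getD x 0)
          (fun x => PySem.Set.len (PySem.Set.inter (adjA.getD x []) rem)) (fun x hx => hdeg x hx)]
        exact hm
      rw [List.foldl_cons, twStepA_step adjA rem tw v hrem hm,
          twLoop_step adjB deg rem tw v hrem hminB]
      have hnb : PySem.Set.inter (adjB.getD v []) rem = PySem.Set.inter (adjA.getD v []) rem := by
        rw [hAB v]
      rw [hnb]
      -- names
      have hnbmem : ∀ b ∈ PySem.Set.inter (adjA.getD v []) rem, b ∈ rem := by
        intro b hb; exact ((PySem.Set.mem_inter _ _ _).1 hb).2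
      have hnbnd : (PySem.Set.inter (adjA.getD v []) rem).Nodup :=
        PySem.Set.nodup_inter _ _ (hnd v)
      have hdegB : ∀ x ∈ rem, deg.getD x 0
          = PySem.Set.len (PySem.Set.inter ((adjB, deg).1.getD x []) rem) := by
        intro x hx; rw [show (adjB, deg).1 = adjB from rfl, ← hAB x]; exact hdeg x hx
      have hndB : ∀ x, (((adjB, deg) : PySem.Dict Int (PySem.Set Int) × PySem.Dict Int Int).1.getD x []).Nodup := by
        intro x; rw [show (adjB, deg).1 = adjB from rfl, ← hAB x]; exact hnd x
      obtain ⟨hndB', hP'⟩ := twPairRecGB_inv rem (PySem.Set.inter (adjA.getD v []) rem)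
        (adjB, deg) hnbmem hndB hdegB
      have hAB0 : ∀ x, ((adjB, deg) : PySem.Dict Int (PySem.Set Int) × PySem.Dict Int Int).1.getD x [] = adjA.getD x [] :=
        fun x => (hAB x).symm
      have hAB' : ∀ x, (twPairRec twGB (PySem.Set.inter (adjA.getD v []) rem) (adjB, deg)).1.getD x []
          = (twPairRec twAddE (PySem.Set.inter (adjA.getD v []) rem) adjA).getD x [] :=
        twPairRecGB_fst _ _ _ hAB0
      have hnd' := twPairRec_nodup (PySem.Set.inter (adjA.getD v []) rem) adjA hnd
      have hsym' := twPairRec_sym (PySem.Set.inter (adjA.getD v []) rem) adjA hsym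
      have hchar := twPairRec_mem (PySem.Set.inter (adjA.getD v []) rem) adjA hnbnd
      have hlt : (PySem.Set.discard rem v).length < rem.length := by
        simp only [PySem.Set.discard]
        exact List.length_filter_lt_length_iff_exists.mpr ⟨v, hv, by simp⟩
      apply ih
      · intro x; exact (hAB' x).symm
      · exact PySem.Set.nodup_discard rem v hndr
      · exact hnd'
      · exact hsym'
      · -- the degree invariant after fill + removal
        intro x hx
        obtain ⟨hxr, hxv⟩ := (PySem.Set.mem_discard rem v x).1 hx
        rw [twDecFold v _ _ x hnbnd, hP' x hxr, hAB' x, twInterDiscard,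
            twLenDiscard _ v (PySem.Set.nodup_inter _ _ (hnd' x))]
        have hiff : (x ∈ PySem.Set.inter (adjA.getD v []) rem ∧ x ≠ v)
            ↔ v ∈ PySem.Set.inter ((twPairRec twAddE (PySem.Set.inter (adjA.getD v []) rem) adjA).getD x []) rem := by
          simp only [PySem.Set.mem_inter]
          constructor
          · rintro ⟨⟨hxa, hxr2⟩, hxv2⟩
            exact ⟨by rw [hsym' v x, hchar v x]; exact Or.inl hxa, hv⟩
          · rintro ⟨hvm, _⟩
            rw [hsym' v x, hchar v x] at hvm
            rcases hvm with h | ⟨_, hxnb, _⟩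
            · exact ⟨⟨h, hxr⟩, hxv⟩
            · exact ⟨(PySem.Set.mem_inter _ _ x).1 hxnb, hxv⟩
        rw [if_congr hiff rfl rfl]
      · have hlen' : rem.length ≤ l.length + 1 := by simpa using hlen
        omega

lemma twBuildFold_nodup : ∀ (clauses : List (List (Int × Int))) (adj : PySem.Dict Int (PySem.Set Int)),
    (∀ x, (adj.getD x []).Nodup) →
    ∀ x, ((clauses.foldl (fun adj clause => twPairRec twAddE (clause.map (fun lit => lit.1)) adj) adj).getD x []).Nodup := by
  intro clauses
  induction clauses with
  | nil => intro adj h x; exact h x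
  | cons c cs ih =>
    intro adj h x
    simp only [List.foldl_cons]
    exact ih _ (twPairRec_nodup _ adj h) x

lemma twBuildFold_sym : ∀ (clauses : List (List (Int × Int))) (adj : PySem.Dict Int (PySem.Set Int)),
    (∀ a b : Int, a ∈ adj.getD b [] ↔ b ∈ adj.getD a []) →
    ∀ a b : Int,
      a ∈ (clauses.foldl (fun adj clause => twPairRec twAddE (clause.map (fun lit => lit.1)) adj) adj).getD b []
      ↔ b ∈ (clauses.foldl (fun adj clause => twPairRec twAddE (clause.map (fun lit => lit.1)) adj) adj).getD a [] := by
  intro clauses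
  induction clauses with
  | nil => intro adj h a b; exact h a b
  | cons c cs ih =>
    intro adj h a b
    simp only [List.foldl_cons]
    exact ih _ (twPairRec_sym _ adj h) a b

def twFillBraw (vs : List Int) (adj : PySem.Dict Int (PySem.Set Int)) : PySem.Dict Int (PySem.Set Int) :=
  (PySem.List.enumerate vs).foldl (fun adj ia =>
    (PySem.List.slice vs (some (ia.1+1)) none).foldl (fun adj b =>
      let adj := adj.modify ia.2 [] (fun s => PySem.Set.add s b)
      adj.modify b [] (fun s => PySem.Set.add s ia.2)) adj) adj

lemma twFillBraw_eq (vs : List Int) (adj : PySem.Dict Int (PySem.Set Int)) :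
    twFillBraw vs adj = twPairRec twAddE vs adj := twShapeB_eq twAddE vs adj

lemma twBuildStepA (c : List (Int × Int)) (adj : PySem.Dict Int (PySem.Set Int)) :
    (let vs := c.map (fun lit => lit.1)
     (PySem.List.pyRange 0 (PySem.List.len vs)).foldl (fun adj i =>
        (PySem.List.pyRange (i+1) (PySem.List.len vs)).foldl (fun adj j =>
          let adj := adj.modify (PySem.List.pyGetD vs i 0) [] (fun s => PySem.Set.add s (PySem.List.pyGetD vs j 0))
          adj.modify (PySem.List.pyGetD vs j 0) [] (fun s => PySem.Set.add s (PySem.List.pyGetD vs i 0))) adj) adj)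
    = twPairRec twAddE (c.map (fun lit => lit.1)) adj := by
  rw [← twFillA_eq]
  rfl

lemma twBuildStepB (c : List (Int × Int)) (adj : PySem.Dict Int (PySem.Set Int)) :
    (let vs := c.map (fun lit => lit.1)
     (PySem.List.enumerate vs).foldl (fun adj ia =>
        (PySem.List.slice vs (some (ia.1+1)) none).foldl (fun adj b =>
          let adj := adj.modify ia.2 [] (fun s => PySem.Set.add s b)
          adj.modify b [] (fun s => PySem.Set.add s ia.2)) adj) adj)
    = twPairRec twAddE (c.map (fun lit => lit.1)) adj := by
  rw [← twFillBraw_eq]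
  rfl

lemma twBuild_eq : ∀ (clauses : List (List (Int × Int))) (adj0 : PySem.Dict Int (PySem.Set Int)),
    clauses.foldl (fun adj clause =>
      let vs := clause.map (fun lit => lit.1)
      (PySem.List.pyRange 0 (PySem.List.len vs)).foldl (fun adj i =>
        (PySem.List.pyRange (i+1) (PySem.List.len vs)).foldl (fun adj j =>
          let adj := adj.modify (PySem.List.pyGetD vs i 0) [] (fun s => PySem.Set.add s (PySem.List.pyGetD vs j 0))
          adj.modify (PySem.List.pyGetD vs j 0) [] (fun s => PySem.Set.add s (PySem.List.pyGetD vs i 0))) adj) adj)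
      adj0
    = clauses.foldl (fun adj clause => twPairRec twAddE (clause.map (fun lit => lit.1)) adj) adj0 := by
  intro clauses
  induction clauses with
  | nil => intro adj0; rfl
  | cons c cs ih =>
    intro adj0
    simp only [List.foldl_cons]
    rw [twBuildStepA c adj0, ih]

lemma twBuildB_eq : ∀ (clauses : List (List (Int × Int))) (adj0 : PySem.Dict Int (PySem.Set Int)),
    clauses.foldl (fun adj clause =>
      let vs := clause.map (fun lit => lit.1)
      (PySem.List.enumerate vs).foldl (fun adj ia =>
        (PySem.List.slice vs (some (ia.1+1)) none).foldl (fun adj b =>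
          let adj := adj.modify ia.2 [] (fun s => PySem.Set.add s b)
          adj.modify b [] (fun s => PySem.Set.add s ia.2)) adj) adj)
      adj0
    = clauses.foldl (fun adj clause => twPairRec twAddE (clause.map (fun lit => lit.1)) adj) adj0 := by
  intro clauses
  induction clauses with
  | nil => intro adj0; rfl
  | cons c cs ih =>
    intro adj0
    simp only [List.foldl_cons]
    rw [twBuildStepB c adj0, ih]


-- ===== VERDICT (by name: the statement is the Claim_ definition above) =====
theorem treewidth_heuristic_spec : Claim_equal_treewidth_heuristic := by
  unfold Claim_equal_treewidth_heuristic
  intro n clauses _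
  unfold Spec_treewidth_heuristic
  have hA0 : treewidth_heuristic n clauses
      = ((PySem.List.pyRange 0 n).foldl (fun st _ => twStepA st)
          (clauses.foldl (fun adj clause =>
            let vs := clause.map (fun lit => lit.1)
            (PySem.List.pyRange 0 (PySem.List.len vs)).foldl (fun adj i =>
              (PySem.List.pyRange (i+1) (PySem.List.len vs)).foldl (fun adj j =>
                let adj := adj.modify (PySem.List.pyGetD vs i 0) [] (fun s => PySem.Set.add s (PySem.List.pyGetD vs j 0))
                adj.modify (PySem.List.pyGetD vs j 0) [] (fun s => PySem.Set.add s (PySem.List.pyGetD vs i 0))) adj) adj)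
            PySem.Dict.empty,
           PySem.Set.ofList (PySem.List.pyRange 0 n), (0 : Int))).2.2 := rfl
  have hB0 : treewidth_heuristic_alt n clauses
      = twLoop
          (clauses.foldl (fun adj clause =>
            let vs := clause.map (fun lit => lit.1)
            (PySem.List.enumerate vs).foldl (fun adj ia =>
              (PySem.List.slice vs (some (ia.1+1)) none).foldl (fun adj b =>
                let adj := adj.modify ia.2 [] (fun s => PySem.Set.add s b)
                adj.modify b [] (fun s => PySem.Set.add s ia.2)) adj) adj)
            PySem.Dict.empty)
          ((PySem.List.pyRange 0 n).foldl
            (fun d x => d.insert x (PySem.Set.len (PySem.Set.inter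
              ((clauses.foldl (fun adj clause =>
                let vs := clause.map (fun lit => lit.1)
                (PySem.List.enumerate vs).foldl (fun adj ia =>
                  (PySem.List.slice vs (some (ia.1+1)) none).foldl (fun adj b =>
                    let adj := adj.modify ia.2 [] (fun s => PySem.Set.add s b)
                    adj.modify b [] (fun s => PySem.Set.add s ia.2)) adj) adj)
                PySem.Dict.empty).getD x [])
              (PySem.Set.ofList (PySem.List.pyRange 0 n)))))
            PySem.Dict.empty)
          (PySem.Set.ofList (PySem.List.pyRange 0 n)) 0 := rfl
  rw [twBuild_eq] at hA0
  rw [twBuildB_eq] at hB0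
  have hrem0 : PySem.Set.ofList (PySem.List.pyRange 0 n) = PySem.List.pyRange 0 n :=
    PySem.Set.ofList_eq_self_of_nodup _ (PySem.List.nodup_pyRange_one 0 n)
  rw [hrem0] at hA0 hB0
  rw [hA0, hB0]
  apply twLoop_main
  · intro x; rfl
  · exact PySem.List.nodup_pyRange_one 0 n
  · exact twBuildFold_nodup clauses PySem.Dict.empty (by intro x; rw [PySem.Dict.getD_empty]; exact List.nodup_nil)
  · exact twBuildFold_sym clauses PySem.Dict.empty (by intro a b; rw [PySem.Dict.getD_empty, PySem.Dict.getD_empty]; simp)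
  · intro x hx
    rw [twDegInit (fun x => PySem.Set.len (PySem.Set.inter
        ((clauses.foldl (fun adj clause => twPairRec twAddE (clause.map (fun lit => lit.1)) adj) PySem.Dict.empty).getD x [])
        (PySem.List.pyRange 0 n)))]
    rw [if_pos hx]
  · exact le_refl _
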